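-- pv_equiv track=rewrite | github.com/PhilipsWanCH/MASC | actions/scheduling.py | fifo_scheduling_custom_v3
-- ===== SOURCE A (Python) =====
-- from collections import defaultdict
--
-- def fifo_scheduling_custom_v3(num_machines, num_jobs, flat_processing_times):
--     # Initialize machines
--     machines_schedule = defaultdict(lambda: {'current_time': 0, 'jobs': []})
--     total_processing_time = 0
--
--     # Decode the flat list into job processing times
--     processing_times = [flat_processing_times[i * num_machines:(i + 1) * num_machines] for i in range(num_jobs)]
--
--     # Schedule jobs based on processing times
--     for job_id, times in enumerate(processing_times, start=1):
--         for machine_id, time in enumerate(times, start=1):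
--             start_time = machines_schedule[machine_id]['current_time']
--             end_time = start_time + time
--             machines_schedule[machine_id]['jobs'].append((f"J{job_id}", start_time, end_time))
--             machines_schedule[machine_id]['current_time'] = end_time
--             total_processing_time = max(total_processing_time, end_time)
--
--     # Return formatted schedule and total processing time
--     formatted_schedule = {}
--     for machine_id in range(1, num_machines + 1):
--         formatted_schedule[f"M{machine_id}"] = [(job[0], job[1], job[2]) for job in
--                                                 machines_schedule[machine_id]['jobs']]
--     return formatted_schedule, total_processing_time
-- ===== SOURCE B (Python) =====
-- from itertools import accumulate
--
-- def fifo_scheduling_custom_v3(num_machines, num_jobs, flat_processing_times):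
--     # Decode the flat list into job rows (same slicing as the original, so
--     # jagged rows from a short flat list behave identically).
--     rows = [flat_processing_times[i * num_machines:(i + 1) * num_machines]
--             for i in range(num_jobs)]
--
--     # One pass over the decoded entries: transpose the jagged rows into
--     # per-machine columns of (job_id, time), in job order.
--     cols = {}
--     for i, row in enumerate(rows):
--         for k, t in enumerate(row):
--             cols.setdefault(k, []).append((i + 1, t))
--
--     schedule = {}
--     makespan = 0
--     # Machine-major: each machine's FIFO queue is a prefix sum of its column.
--     for m in range(1, num_machines + 1):
--         col = cols.get(m - 1, [])
--         ends = list(accumulate(t for _, t in col))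
--         entries = []
--         start = 0
--         for (j, _), e in zip(col, ends):
--             entries.append(("J%d" % j, start, e))
--             start = e
--         schedule["M%d" % m] = entries
--         for e in ends:
--             makespan = max(makespan, e)
--     return schedule, makespan
-- ===== Notes on version B (the rewrite author's own statement) =====
-- stated objective: alternative
-- what changed: B replaces A's job-major walk over a mutable per-machine state dict by a machine-major decomposition: one pass transposes the decoded job rows into per-machine columns, each machine's FIFO queue is then built directly as a prefix sum (itertools.accumulate) of its column, and the makespan is folded per machine.
-- outside the precondition, e.g. on fifo_scheduling_custom_v3(-1, 2, [1, 2, 3]): A returns ({}, 2), B returns ({}, 0)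
import Mathlib
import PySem

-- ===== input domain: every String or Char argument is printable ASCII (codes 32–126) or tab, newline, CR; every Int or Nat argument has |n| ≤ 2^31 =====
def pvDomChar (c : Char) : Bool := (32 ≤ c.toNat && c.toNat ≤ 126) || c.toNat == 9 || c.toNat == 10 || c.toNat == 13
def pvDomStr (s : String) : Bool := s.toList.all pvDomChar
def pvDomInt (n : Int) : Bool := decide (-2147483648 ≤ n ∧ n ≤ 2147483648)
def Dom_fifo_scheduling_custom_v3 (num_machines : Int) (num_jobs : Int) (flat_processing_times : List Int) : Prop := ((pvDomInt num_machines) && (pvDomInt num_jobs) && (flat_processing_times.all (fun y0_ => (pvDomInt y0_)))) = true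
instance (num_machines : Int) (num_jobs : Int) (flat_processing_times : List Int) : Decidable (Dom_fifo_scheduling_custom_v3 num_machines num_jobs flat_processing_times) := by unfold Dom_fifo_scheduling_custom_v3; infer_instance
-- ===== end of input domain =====

-- B re-decomposes A machine-major: each machine's FIFO queue is built as a prefix sum of
-- its column of the decoded job rows, instead of A's job-major walk over a mutable
-- per-machine state dict; same cost, different traversal (objective: alternative).

-- ===== PORT A =====
-- inner loop body: one (machine_id, time) step of job `jid` on the state (dict, total)
def pvInnerA (jid : Int) (s : PySem.Dict Int (Int × List (String × Int × Int)) × Int)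
    (mt : Int × Int) : PySem.Dict Int (Int × List (String × Int × Int)) × Int :=
  let cur := s.1.getD mt.1 (0, [])
  let start_time := cur.1
  let end_time := start_time + mt.2
  (s.1.insert mt.1 (end_time, cur.2 ++ [("J" ++ PySem.Int.toStr jid, start_time, end_time)]),
   max s.2 end_time)

-- outer loop body: schedule one job row
def pvOuterA (s : PySem.Dict Int (Int × List (String × Int × Int)) × Int)
    (jt : Int × List Int) : PySem.Dict Int (Int × List (String × Int × Int)) × Int :=
  (PySem.List.enumerate jt.2 1).foldl (pvInnerA jt.1) s

def fifo_scheduling_custom_v3 (num_machines : Int) (num_jobs : Int) (flat_processing_times : List Int) : (List (String × List (String × Int × Int))) × Int :=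
  let processing_times := (PySem.List.pyRange 0 num_jobs 1).map
    (fun i => PySem.List.slice flat_processing_times (some (i * num_machines)) (some ((i + 1) * num_machines)))
  let st := (PySem.List.enumerate processing_times 1).foldl pvOuterA (PySem.Dict.empty, 0)
  let formatted := (PySem.List.pyRange 1 (num_machines + 1) 1).map
    (fun m => ("M" ++ PySem.Int.toStr m,
      ((st.1.getD m (0, [])).2).map (fun job => (job.1, job.2.1, job.2.2))))
  (formatted, st.2)

-- ===== PORT B =====
-- list(accumulate(...)) with running sum starting at acc
def pvAccumulate : List Int → Int → List Int
  | [], _ => []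
  | t :: ts, acc => (acc + t) :: pvAccumulate ts (acc + t)

-- the zip loop building ("J{j}", start, end) entries with a running start
def pvBuildEntries : List (Int × Int) → List Int → Int → List (String × Int × Int)
  | p :: ps, e :: es, start => ("J" ++ PySem.Int.toStr p.1, start, e) :: pvBuildEntries ps es e
  | _, _, _ => []

-- one machine-major iteration: append machine m's queue, fold its ends into the makespan
def pvMachB (cols : PySem.Dict Int (List (Int × Int))) (st : List (String × List (String × Int × Int)) × Int)
    (m : Int) : List (String × List (String × Int × Int)) × Int :=
  let col := cols.getD (m - 1) []
  let ends := pvAccumulate (col.map (·.2)) 0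
  let entries := pvBuildEntries col ends 0
  (st.1 ++ [("M" ++ PySem.Int.toStr m, entries)], ends.foldl max st.2)

def fifo_scheduling_custom_v3_alt (num_machines : Int) (num_jobs : Int) (flat_processing_times : List Int) : (List (String × List (String × Int × Int))) × Int :=
  let rows := (PySem.List.pyRange 0 num_jobs 1).map
    (fun i => PySem.List.slice flat_processing_times (some (i * num_machines)) (some ((i + 1) * num_machines)))
  -- one pass: cols.setdefault(k, []).append((i + 1, t))
  let cols := (PySem.List.enumerate rows 0).foldl
    (fun d p => (PySem.List.enumerate p.2 0).foldl
      (fun d q => d.modify q.1 [] (· ++ [(p.1 + 1, q.2)])) d)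
    PySem.Dict.empty
  (PySem.List.pyRange 1 (num_machines + 1) 1).foldl (pvMachB cols) ([], 0)

-- ===== PRECONDITION & SPEC =====
-- Pre_ excludes negative machine counts, outside the task's natural domain: there A's
-- negative-bound slicing still schedules machines that its returned dict then omits.
def Pre_fifo_scheduling_custom_v3 (num_machines : Int) (num_jobs : Int) (flat_processing_times : List Int) : Prop :=
  0 ≤ num_machines
instance (num_machines : Int) (num_jobs : Int) (flat_processing_times : List Int) : Decidable (Pre_fifo_scheduling_custom_v3 num_machines num_jobs flat_processing_times) := by unfold Pre_fifo_scheduling_custom_v3; infer_instance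
def pvWitness_fifo_scheduling_custom_v3 : Int × Int × List Int := (2, 3, [1, 2, 3])

def Spec_fifo_scheduling_custom_v3 (num_machines : Int) (num_jobs : Int) (flat_processing_times : List Int) (out : (List (String × List (String × Int × Int))) × Int) : Prop := out = fifo_scheduling_custom_v3_alt num_machines num_jobs flat_processing_times
instance (num_machines : Int) (num_jobs : Int) (flat_processing_times : List Int) (out : (List (String × List (String × Int × Int))) × Int) : Decidable (Spec_fifo_scheduling_custom_v3 num_machines num_jobs flat_processing_times out) := by unfold Spec_fifo_scheduling_custom_v3; infer_instance

-- ===== CLAIM (what is proved, stated in full; the proofs are below) =====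
def Claim_equal_fifo_scheduling_custom_v3 : Prop := ∀ (num_machines : Int) (num_jobs : Int) (flat_processing_times : List Int), Dom_fifo_scheduling_custom_v3 num_machines num_jobs flat_processing_times → Pre_fifo_scheduling_custom_v3 num_machines num_jobs flat_processing_times → Spec_fifo_scheduling_custom_v3 num_machines num_jobs flat_processing_times (fifo_scheduling_custom_v3 num_machines num_jobs flat_processing_times)

-- ===== LEMMAS AND PROOFS =====

-- Python xs[i] on a cons cell, positive index
theorem pyGetD_cons_shift (t : Int) (ts : List Int) (i : Int) (h : 1 ≤ i) (d : Int) :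
    PySem.List.pyGetD (t :: ts) i d = PySem.List.pyGetD ts (i - 1) d := by
  have h0 : (0:Int) ≤ i := by omega
  have h0' : (0:Int) ≤ i - 1 := by omega
  simp only [PySem.List.pyGetD, PySem.List.pyGet?, PySem.List.pyIdx?, if_pos h0, if_pos h0']
  by_cases hle : i ≤ (ts.length : Int)
  · have hi : i.toNat = (i-1).toNat + 1 := by omega
    rw [if_pos (by simp; omega), if_pos (by omega), hi]
    simp
  · simp [hle]

theorem pyGetD_cons_zero (t : Int) (ts : List Int) (d : Int) :
    PySem.List.pyGetD (t :: ts) 0 d = t := by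
  simp [PySem.List.pyGetD, PySem.List.pyGet?, PySem.List.pyIdx?]

-- canonical per-machine run: machine m's (final time, queue) over the job rows
def pvRun (m : Int) : List (List Int) → Int → Int → Int × List (String × Int × Int)
  | [], _, cur => (cur, [])
  | r :: rs, jid, cur =>
    if m ≤ (r.length : Int) then
      ((pvRun m rs (jid + 1) (cur + PySem.List.pyGetD r (m - 1) 0)).1,
       ("J" ++ PySem.Int.toStr jid, cur, cur + PySem.List.pyGetD r (m - 1) 0) ::
         (pvRun m rs (jid + 1) (cur + PySem.List.pyGetD r (m - 1) 0)).2)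
    else pvRun m rs (jid + 1) cur

-- machine m's end-time column
def pvColEnds (m : Int) : List (List Int) → Int → List Int
  | [], _ => []
  | r :: rs, cur =>
    if m ≤ (r.length : Int) then
      (cur + PySem.List.pyGetD r (m - 1) 0) :: pvColEnds m rs (cur + PySem.List.pyGetD r (m - 1) 0)
    else pvColEnds m rs cur

-- the machine→current-time environment, and its update by one job row
def pvEnv (r : List Int) (γ : Int → Int) : Int → Int := fun m =>
  if 1 ≤ m ∧ m ≤ (r.length : Int) then γ m + PySem.List.pyGetD r (m - 1) 0 else γ m

def pvRowEnds (γ : Int → Int) (c : Int) : List Int → List Int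
  | [] => []
  | t :: ts => (γ c + t) :: pvRowEnds γ (c + 1) ts

-- job-major list of all end times, as A produces them
def pvAllEnds (γ : Int → Int) : List (List Int) → List Int
  | [] => []
  | r :: rs => pvRowEnds γ 1 r ++ pvAllEnds (pvEnv r γ) rs

def pvGamma (d : PySem.Dict Int (Int × List (String × Int × Int))) : Int → Int :=
  fun m => (d.getD m (0, [])).1

theorem pvRowEnds_congr (g1 g2 : Int → Int) (ts : List Int) : ∀ (c : Int),
    (∀ m, c ≤ m → g1 m = g2 m) → pvRowEnds g1 c ts = pvRowEnds g2 c ts := by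
  induction ts with
  | nil => intro c h; rfl
  | cons t ts ih =>
    intro c h
    simp only [pvRowEnds, h c le_rfl, ih (c + 1) (fun m hm => h m (by omega))]

-- inner loop: dict after one row
theorem innerA_dict (jid : Int) (r : List Int) : ∀ (c : Int) (s : PySem.Dict Int (Int × List (String × Int × Int)) × Int) (m : Int),
    (((PySem.List.enumerate r c).foldl (pvInnerA jid) s).1).getD m (0, []) =
      if c ≤ m ∧ m < c + (r.length : Int) then
        (pvGamma s.1 m + PySem.List.pyGetD r (m - c) 0,
         (s.1.getD m (0, [])).2 ++ [("J" ++ PySem.Int.toStr jid, pvGamma s.1 m, pvGamma s.1 m + PySem.List.pyGetD r (m - c) 0)])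
      else s.1.getD m (0, []) := by
  induction r with
  | nil =>
    intro c s m
    rw [if_neg (by simp only [List.length_nil]; push_cast; omega)]
    rfl
  | cons t ts ih =>
    intro c s m
    rw [PySem.List.enumerate_cons, List.foldl_cons, ih]
    by_cases hm : m = c
    · subst hm
      rw [if_neg (by omega), if_pos (by simp only [List.length_cons]; push_cast; omega)]
      simp [pvInnerA, pvGamma, PySem.Dict.getD_insert, pyGetD_cons_zero]
    · by_cases hin : c + 1 ≤ m ∧ m < c + 1 + (ts.length : Int)
      · rw [if_pos hin, if_pos (by simp only [List.length_cons]; push_cast; omega)]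
        have hsh : PySem.List.pyGetD (t :: ts) (m - c) 0 = PySem.List.pyGetD ts (m - (c + 1)) 0 := by
          rw [pyGetD_cons_shift t ts (m - c) (by omega)]; ring_nf
        simp only [pvInnerA, pvGamma, PySem.Dict.getD_insert, if_neg hm, hsh]
      · rw [if_neg hin, if_neg (by simp only [List.length_cons]; push_cast; omega)]
        simp only [pvInnerA, pvGamma, PySem.Dict.getD_insert, if_neg hm]

-- inner loop: running max after one row
theorem innerA_total (jid : Int) (r : List Int) : ∀ (c : Int) (s : PySem.Dict Int (Int × List (String × Int × Int)) × Int),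
    ((PySem.List.enumerate r c).foldl (pvInnerA jid) s).2 =
      List.foldl max s.2 (pvRowEnds (pvGamma s.1) c r) := by
  induction r with
  | nil => intro c s; rfl
  | cons t ts ih =>
    intro c s
    rw [PySem.List.enumerate_cons, List.foldl_cons, ih]
    simp only [pvRowEnds, List.foldl_cons]
    congr 1
    apply pvRowEnds_congr
    intro m hm
    simp only [pvInnerA, pvGamma, PySem.Dict.getD_insert, if_neg (by omega : ¬ m = c)]

theorem gamma_after_row (jid : Int) (r : List Int) (s : PySem.Dict Int (Int × List (String × Int × Int)) × Int) :
    pvGamma ((PySem.List.enumerate r 1).foldl (pvInnerA jid) s).1 = pvEnv r (pvGamma s.1) := by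
  funext m
  simp only [pvGamma, pvEnv, innerA_dict jid r 1 s m]
  by_cases h : 1 ≤ m ∧ m ≤ (r.length : Int)
  · rw [if_pos (by omega), if_pos h]
  · rw [if_neg (by omega), if_neg h]

-- outer loop: dict after all rows = per-machine runs
theorem outerA_dict (rows : List (List Int)) : ∀ (jid : Int) (s : PySem.Dict Int (Int × List (String × Int × Int)) × Int) (m : Int), 1 ≤ m →
    (((PySem.List.enumerate rows jid).foldl pvOuterA s).1).getD m (0, []) =
      ((pvRun m rows jid (pvGamma s.1 m)).1,
       (s.1.getD m (0, [])).2 ++ (pvRun m rows jid (pvGamma s.1 m)).2) := by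
  induction rows with
  | nil => intro jid s m _; simp [pvRun, pvGamma]
  | cons r rs ih =>
    intro jid s m hm
    rw [PySem.List.enumerate_cons, List.foldl_cons]
    have hout : pvOuterA s (jid, r) = (PySem.List.enumerate r 1).foldl (pvInnerA jid) s := rfl
    rw [ih (jid + 1) (pvOuterA s (jid, r)) m hm, hout, gamma_after_row jid r s,
        innerA_dict jid r 1 s m]
    by_cases h : m ≤ (r.length : Int)
    · rw [if_pos (by omega), pvRun, if_pos h]
      have he : pvEnv r (pvGamma s.1) m = pvGamma s.1 m + PySem.List.pyGetD r (m - 1) 0 := by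
        simp only [pvEnv, if_pos (And.intro hm h)]
      simp [he]
    · rw [if_neg (by omega), pvRun, if_neg h]
      have he : pvEnv r (pvGamma s.1) m = pvGamma s.1 m := by
        simp only [pvEnv, if_neg (by omega : ¬ (1 ≤ m ∧ m ≤ (r.length : Int)))]
      rw [he]

-- outer loop: final running max = job-major fold of all end times
theorem outerA_total (rows : List (List Int)) : ∀ (jid : Int) (s : PySem.Dict Int (Int × List (String × Int × Int)) × Int),
    ((PySem.List.enumerate rows jid).foldl pvOuterA s).2 =
      List.foldl max s.2 (pvAllEnds (pvGamma s.1) rows) := by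
  induction rows with
  | nil => intro jid s; rfl
  | cons r rs ih =>
    intro jid s
    rw [PySem.List.enumerate_cons, List.foldl_cons]
    have hout : pvOuterA s (jid, r) = (PySem.List.enumerate r 1).foldl (pvInnerA jid) s := rfl
    rw [ih (jid + 1) (pvOuterA s (jid, r)), hout, gamma_after_row jid r s,
        innerA_total jid r 1 s]
    simp only [pvAllEnds, List.foldl_append]

-- column m of the rows, as (job_id, time) pairs (rows enumerated from k)
def pvColB (m : Int) (rows : List (List Int)) (k : Int) : List (Int × Int) :=
  (PySem.List.enumerate rows k).filterMap
    (fun p => if m ≤ (p.2.length : Int) then some (p.1 + 1, PySem.List.pyGetD p.2 (m - 1) 0) else none)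

theorem pvColB_cons (m : Int) (r : List Int) (rs : List (List Int)) (k : Int) :
    pvColB m (r :: rs) k =
      if m ≤ (r.length : Int) then
        (k + 1, PySem.List.pyGetD r (m - 1) 0) :: pvColB m rs (k + 1)
      else pvColB m rs (k + 1) := by
  simp only [pvColB, PySem.List.enumerate_cons, List.filterMap_cons]
  by_cases h : m ≤ (r.length : Int) <;> simp [h]

-- B side: the accumulate/zip construction equals the canonical run
theorem colB_ends (m : Int) (rows : List (List Int)) : ∀ (k cur : Int),
    pvAccumulate ((pvColB m rows k).map (·.2)) cur =
      (pvRun m rows (k + 1) cur).2.map (fun x => x.2.2) := by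
  induction rows with
  | nil => intro k cur; simp [pvColB, pvRun, PySem.List.enumerate_nil, pvAccumulate]
  | cons r rs ih =>
    intro k cur
    rw [pvColB_cons, pvRun]
    by_cases h : m ≤ (r.length : Int)
    · rw [if_pos h, if_pos h]
      simp only [List.map_cons, pvAccumulate, List.map]
      rw [ih (k + 1) (cur + PySem.List.pyGetD r (m - 1) 0)]
    · rw [if_neg h, if_neg h]
      exact ih (k + 1) cur

theorem colB_entries (m : Int) (rows : List (List Int)) : ∀ (k cur : Int),
    pvBuildEntries (pvColB m rows k) (pvAccumulate ((pvColB m rows k).map (·.2)) cur) cur =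
      (pvRun m rows (k + 1) cur).2 := by
  induction rows with
  | nil => intro k cur; simp [pvColB, pvRun, PySem.List.enumerate_nil, pvAccumulate, pvBuildEntries]
  | cons r rs ih =>
    intro k cur
    rw [pvColB_cons]
    by_cases h : m ≤ (r.length : Int)
    · rw [if_pos h]
      simp only [List.map_cons, pvAccumulate, pvBuildEntries, pvRun, if_pos h]
      rw [ih (k + 1) (cur + PySem.List.pyGetD r (m - 1) 0)]
    · rw [if_neg h]
      simp only [pvRun, if_neg h]
      exact ih (k + 1) cur

theorem run_ends_eq_colEnds (m : Int) (rows : List (List Int)) : ∀ (jid cur : Int),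
    (pvRun m rows jid cur).2.map (fun x => x.2.2) = pvColEnds m rows cur := by
  induction rows with
  | nil => intro jid cur; rfl
  | cons r rs ih =>
    intro jid cur
    rw [pvRun, pvColEnds]
    by_cases h : m ≤ (r.length : Int)
    · rw [if_pos h, if_pos h]
      simp only [List.map_cons]
      rw [ih (jid + 1) (cur + PySem.List.pyGetD r (m - 1) 0)]
    · rw [if_neg h, if_neg h]
      exact ih (jid + 1) cur

-- the key of enumerate: at most one hit
theorem filter_enumerate_key (r : List Int) : ∀ (k c : Int),
    (PySem.List.enumerate r k).filter (fun q => q.1 == c) =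
      (if k ≤ c ∧ c < k + (r.length : Int) then [(c, PySem.List.pyGetD r (c - k) 0)] else []) := by
  induction r with
  | nil =>
    intro k c
    rw [if_neg (by simp only [List.length_nil]; push_cast; omega)]
    rfl
  | cons t ts ih =>
    intro k c
    rw [PySem.List.enumerate_cons, List.filter_cons]
    by_cases hk : k = c
    · subst hk
      have hb : (((k, t).1 == k) : Bool) = true := by simp
      have h2 : (PySem.List.enumerate ts (k + 1)).filter (fun q => q.1 == k) = [] := by
        rw [ih (k + 1) k, if_neg (by omega)]
      rw [hb, if_pos rfl, h2,
          if_pos (by constructor; omega; simp only [List.length_cons]; push_cast; omega)]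
      simp [pyGetD_cons_zero]
    · have hne : ((k, t).1 == c) = false := by simp; omega
      rw [hne, if_neg (by trivial), ih (k + 1) c]
      by_cases hin : k + 1 ≤ c ∧ c < k + 1 + (ts.length : Int)
      · rw [if_pos hin, if_pos (by simp only [List.length_cons]; push_cast; omega)]
        have harg : c - k = c - (k + 1) + 1 := by ring
        rw [harg, pyGetD_cons_shift t ts _ (by omega)]
        norm_num
      · rw [if_neg hin, if_neg (by simp only [List.length_cons]; push_cast; omega)]

-- inner transpose loop over one row
theorem inner_cols (i : Int) (r : List Int) (d : PySem.Dict Int (List (Int × Int))) (c : Int) :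
    ((PySem.List.enumerate r 0).foldl (fun d q => d.modify q.1 [] (· ++ [(i + 1, q.2)])) d).getD c []
      = d.getD c [] ++
        (if 0 ≤ c ∧ c < (r.length : Int) then [(i + 1, PySem.List.pyGetD r c 0)] else []) := by
  have hmap : (PySem.List.enumerate r 0).foldl (fun d q => d.modify q.1 [] (· ++ [(i + 1, q.2)])) d
      = ((PySem.List.enumerate r 0).map (fun q => (q.1, (i + 1, q.2)))).foldl
          (fun d p => d.modify p.1 [] (· ++ [p.2])) d := by
    rw [List.foldl_map]
  rw [hmap, PySem.Dict.getD_foldl_modify_append]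
  congr 1
  rw [List.filter_map]
  have hpred : ((fun (p : Int × Int × Int) => p.1 == c) ∘ (fun (q : Int × Int) => (q.1, (i + 1, q.2))))
      = fun (q : Int × Int) => q.1 == c := rfl
  rw [hpred, filter_enumerate_key r 0 c]
  by_cases h : 0 ≤ c ∧ c < (r.length : Int)
  · rw [if_pos (by omega : 0 ≤ c ∧ c < 0 + (r.length : Int)), if_pos h]
    norm_num
  · rw [if_neg (by omega : ¬ (0 ≤ c ∧ c < 0 + (r.length : Int))), if_neg h]
    rfl

-- the transpose fold yields exactly the columns
theorem cols_getD (rows : List (List Int)) : ∀ (k : Int) (d : PySem.Dict Int (List (Int × Int))) (c : Int), 0 ≤ c →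
    ((PySem.List.enumerate rows k).foldl
        (fun d p => (PySem.List.enumerate p.2 0).foldl
          (fun d q => d.modify q.1 [] (· ++ [(p.1 + 1, q.2)])) d) d).getD c []
      = d.getD c [] ++ pvColB (c + 1) rows k := by
  induction rows with
  | nil => intro k d c _; simp [pvColB, PySem.List.enumerate_nil]
  | cons r rs ih =>
    intro k d c hc
    rw [PySem.List.enumerate_cons, List.foldl_cons,
        ih (k + 1) _ c hc, inner_cols k r d c, pvColB_cons, List.append_assoc]
    by_cases h : c + 1 ≤ (r.length : Int)
    · rw [if_pos h, if_pos (by omega : 0 ≤ c ∧ c < (r.length : Int))]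
      have harg : c + 1 - 1 = c := by ring
      rw [harg]
      rfl
    · rw [if_neg h, if_neg (by omega : ¬ (0 ≤ c ∧ c < (r.length : Int)))]
      rfl

-- B's machine-major fold, characterized
theorem machB_fold (rows : List (List Int)) (cols : PySem.Dict Int (List (Int × Int)))
    (hcols : ∀ m, 1 ≤ m → cols.getD (m - 1) [] = pvColB m rows 0) :
    ∀ (ms : List Int), (∀ m ∈ ms, (1 : Int) ≤ m) → ∀ (acc : List (String × List (String × Int × Int)) × Int),
    ms.foldl (pvMachB cols) acc =
      (acc.1 ++ ms.map (fun m => ("M" ++ PySem.Int.toStr m, (pvRun m rows 1 0).2)),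
       List.foldl max acc.2 (ms.flatMap (fun m => pvColEnds m rows 0))) := by
  intro ms
  induction ms with
  | nil => intro _ acc; simp
  | cons mm ms ih =>
    intro hms acc
    rw [List.foldl_cons, ih (fun m hm => hms m (by simp [hm]))]
    have hmach : pvMachB cols acc mm =
        (acc.1 ++ [("M" ++ PySem.Int.toStr mm, (pvRun mm rows 1 0).2)],
         List.foldl max acc.2 (pvColEnds mm rows 0)) := by
      simp only [pvMachB]
      rw [hcols mm (hms mm (by simp)), colB_entries mm rows 0 0, colB_ends mm rows 0 0]
      norm_num
      rw [run_ends_eq_colEnds mm rows 1 0]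
    rw [hmach]
    simp only [List.map_cons, List.flatMap_cons, List.foldl_append, List.append_assoc,
      List.singleton_append]

-- heads-out permutation: a flatMap whose columns each start with an optional head
theorem flatMap_heads_perm (ms : List Int) (f g : Int → List Int) (o : Int → Option Int)
    (h : ∀ m ∈ ms, f m = (o m).toList ++ g m) :
    (ms.flatMap f).Perm (ms.filterMap o ++ ms.flatMap g) := by
  induction ms with
  | nil => simp
  | cons mm ms ih =>
    have hmm := h mm (by simp)
    have ihh := ih (fun m hm => h m (by simp [hm]))
    simp only [List.flatMap_cons, List.filterMap_cons, hmm]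
    cases ho : o mm with
    | none =>
      simp only [ho, Option.toList_none, List.nil_append]
      exact (List.Perm.append_left (g mm) ihh).trans (List.perm_append_comm_assoc _ _ _)
    | some v =>
      simp only [ho, Option.toList_some, List.cons_append, List.singleton_append]
      refine List.Perm.cons v ?_
      exact (List.Perm.append_left (g mm) ihh).trans (List.perm_append_comm_assoc _ _ _)

theorem rowEnds_eq_map_range (γ : Int → Int) (r : List Int) : ∀ (c : Int),
    pvRowEnds γ c r = (PySem.List.pyRange c (c + (r.length : Int)) 1).map
      (fun m => γ m + PySem.List.pyGetD r (m - c) 0) := by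
  induction r with
  | nil =>
    intro c
    rw [PySem.List.pyRange_one_eq_nil (by simp)]
    rfl
  | cons t ts ih =>
    intro c
    have hb : c + ((t :: ts).length : Int) = (c + 1) + (ts.length : Int) := by
      simp only [List.length_cons]; push_cast; ring
    rw [hb, PySem.List.pyRange_one_cons (by omega)]
    simp only [List.map_cons, sub_self, pyGetD_cons_zero, pvRowEnds]
    congr 1
    rw [ih (c + 1)]
    apply List.map_congr_left
    intro m hm
    have h1 : c + 1 ≤ m := (PySem.List.mem_pyRange_one.mp hm).1
    have harg : m - (c + 1) = m - c - 1 := by ring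
    rw [harg, ← pyGetD_cons_shift t ts (m - c) (by omega)]

theorem filterMap_range_rowEnds (γ : Int → Int) (r : List Int) (W : Int)
    (hW : (r.length : Int) ≤ W) :
    (PySem.List.pyRange 1 (W + 1) 1).filterMap
        (fun m => if m ≤ (r.length : Int) then some (γ m + PySem.List.pyGetD r (m - 1) 0) else none)
      = pvRowEnds γ 1 r := by
  have h0 : (0 : Int) ≤ (r.length : Int) := by positivity
  rw [PySem.List.pyRange_one_append 1 ((r.length : Int) + 1) (W + 1) (by omega) (by omega),
      List.filterMap_append]
  have h2 : (PySem.List.pyRange ((r.length : Int) + 1) (W + 1) 1).filterMap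
      (fun m => if m ≤ (r.length : Int) then some (γ m + PySem.List.pyGetD r (m - 1) 0) else none) = [] := by
    apply List.filterMap_eq_nil_iff.mpr
    intro m hm
    have := (PySem.List.mem_pyRange_one.mp hm).1
    simp only [if_neg (by omega : ¬ m ≤ (r.length : Int))]
  have h1 : (PySem.List.pyRange 1 ((r.length : Int) + 1) 1).filterMap
      (fun m => if m ≤ (r.length : Int) then some (γ m + PySem.List.pyGetD r (m - 1) 0) else none)
      = (PySem.List.pyRange 1 ((r.length : Int) + 1) 1).map (fun m => γ m + PySem.List.pyGetD r (m - 1) 0) := by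
    rw [List.filterMap_congr (g := fun m => some (γ m + PySem.List.pyGetD r (m - 1) 0)) ?_]
    · simp
    · intro m hm
      have := (PySem.List.mem_pyRange_one.mp hm).2
      simp only [if_pos (by omega : m ≤ (r.length : Int))]
  rw [h1, h2, List.append_nil, rowEnds_eq_map_range γ r 1]
  have hb : (1 : Int) + (r.length : Int) = (r.length : Int) + 1 := by ring
  rw [hb]

-- the transpose: job-major end times are a permutation of machine-major end times
theorem allEnds_perm (rows : List (List Int)) : ∀ (γ : Int → Int) (W : Int),
    (∀ r ∈ rows, (r.length : Int) ≤ W) →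
    (pvAllEnds γ rows).Perm
      ((PySem.List.pyRange 1 (W + 1) 1).flatMap (fun m => pvColEnds m rows (γ m))) := by
  induction rows with
  | nil =>
    intro γ W _
    simp [pvAllEnds, pvColEnds, List.flatMap]
  | cons r rs ih =>
    intro γ W hlen
    have hW : (r.length : Int) ≤ W := hlen r (by simp)
    have hptw : ∀ m ∈ PySem.List.pyRange 1 (W + 1) 1,
        pvColEnds m (r :: rs) (γ m) =
          ((if m ≤ (r.length : Int) then some (γ m + PySem.List.pyGetD r (m - 1) 0) else none)).toList
            ++ pvColEnds m rs (pvEnv r γ m) := by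
      intro m hm
      have h1 : 1 ≤ m := (PySem.List.mem_pyRange_one.mp hm).1
      by_cases h : m ≤ (r.length : Int)
      · simp only [pvColEnds, if_pos h, Option.toList_some, List.singleton_append, pvEnv,
          if_pos (And.intro h1 h)]
      · simp only [pvColEnds, if_neg h, Option.toList_none, List.nil_append, pvEnv,
          if_neg (by omega : ¬ (1 ≤ m ∧ m ≤ (r.length : Int)))]
    have hheads := flatMap_heads_perm (PySem.List.pyRange 1 (W + 1) 1)
      (fun m => pvColEnds m (r :: rs) (γ m))
      (fun m => pvColEnds m rs (pvEnv r γ m))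
      (fun m => if m ≤ (r.length : Int) then some (γ m + PySem.List.pyGetD r (m - 1) 0) else none)
      hptw
    rw [filterMap_range_rowEnds γ r W hW] at hheads
    have hih := ih (pvEnv r γ) W (fun x hx => hlen x (by simp [hx]))
    show (pvRowEnds γ 1 r ++ pvAllEnds (pvEnv r γ) rs).Perm _
    exact ((List.Perm.append_left _ hih).trans hheads.symm)

theorem rows_len_le (num_machines num_jobs : Int) (flat : List Int) (h : 0 ≤ num_machines) :
    ∀ r ∈ (PySem.List.pyRange 0 num_jobs 1).map
      (fun i => PySem.List.slice flat (some (i * num_machines)) (some ((i + 1) * num_machines))),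
      (r.length : Int) ≤ num_machines := by
  intro r hr
  simp only [List.mem_map] at hr
  obtain ⟨i, hi, rfl⟩ := hr
  have h0i : (0 : Int) ≤ i := (PySem.List.mem_pyRange_one.mp hi).1
  have ha : (0 : Int) ≤ i * num_machines := mul_nonneg h0i h
  have hb : (0 : Int) ≤ (i + 1) * num_machines := mul_nonneg (by omega) h
  rw [PySem.List.slice_toNat _ ha hb]
  have heq : (i + 1) * num_machines = i * num_machines + num_machines := by ring
  have hsub : ((i + 1) * num_machines).toNat - (i * num_machines).toNat ≤ num_machines.toNat := by
    omega
  have hlen : ((flat.drop (i * num_machines).toNat).take (((i + 1) * num_machines).toNat - (i * num_machines).toNat)).length ≤ ((i + 1) * num_machines).toNat - (i * num_machines).toNat := by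
    rw [List.length_take]
    exact Nat.min_le_left _ _
  have : ((flat.drop (i * num_machines).toNat).take (((i + 1) * num_machines).toNat - (i * num_machines).toNat)).length ≤ num_machines.toNat := le_trans hlen hsub
  omega

-- ===== VERDICT (by name: the statement is the Claim_ definition above) =====
theorem fifo_scheduling_custom_v3_spec : Claim_equal_fifo_scheduling_custom_v3 := by
  intro nm nj flat _ hpre
  show fifo_scheduling_custom_v3 nm nj flat = fifo_scheduling_custom_v3_alt nm nj flat
  simp only [fifo_scheduling_custom_v3, fifo_scheduling_custom_v3_alt]
  set rows := (PySem.List.pyRange 0 nj 1).map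
    (fun i => PySem.List.slice flat (some (i * nm)) (some ((i + 1) * nm))) with hrows
  have hc : ∀ m, (1 : Int) ≤ m →
      (((PySem.List.enumerate rows 0).foldl
        (fun d p => (PySem.List.enumerate p.2 0).foldl
          (fun d q => d.modify q.1 [] (· ++ [(p.1 + 1, q.2)])) d)
        PySem.Dict.empty).getD (m - 1) []) = pvColB m rows 0 := by
    intro m hm
    rw [cols_getD rows 0 PySem.Dict.empty (m - 1) (by omega)]
    have harg : m - 1 + 1 = m := by ring
    rw [harg]
    simp [PySem.Dict.getD_empty]
  rw [machB_fold rows _ hc (PySem.List.pyRange 1 (nm + 1) 1)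
      (fun m hm => (PySem.List.mem_pyRange_one.mp hm).1) ([], 0)]
  have hg : pvGamma PySem.Dict.empty = fun _ => (0 : Int) := by
    funext m
    simp [pvGamma, PySem.Dict.getD_empty]
  simp only [Prod.mk.injEq]
  constructor
  · rw [List.nil_append]
    apply List.map_congr_left
    intro m hm
    have h1 : (1 : Int) ≤ m := (PySem.List.mem_pyRange_one.mp hm).1
    rw [outerA_dict rows 1 (PySem.Dict.empty, 0) m h1]
    simp [hg, PySem.Dict.getD_empty]
  · rw [outerA_total rows 1 (PySem.Dict.empty, 0), hg]
    exact List.Perm.foldl_op_eq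
      (allEnds_perm rows (fun _ => 0) nm (rows_len_le nm nj flat hpre))
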